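-- pv_equiv track=rewrite | github.com/sjl421/algo-1 | algo-python/algo/binary_gap.py | max_binary_gap
-- ===== SOURCE A (Python) =====
-- def max_binary_gap(n):
--     binary_repr = bin(n)[2:]
--     gap_value, max_gap = 0, 0
--     is_gap_open = False
--     for bit in binary_repr:
--         if bit == '0' and is_gap_open:
--             gap_value += 1
--         else:
--             if gap_value > max_gap and is_gap_open:
--                 max_gap = gap_value
--             gap_value = 0
--             is_gap_open = True
--     return max_gap
-- ===== SOURCE B (Python) =====
-- def max_binary_gap(n):
--     runs = bin(abs(n))[2:].rstrip('0').split('1')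
--     return max(len(run) for run in runs)
-- ===== Notes on version B (the rewrite author's own statement) =====
-- stated objective: simpler
-- what changed: Replaces A's incremental open/close state machine over the bits with a direct decomposition: take bin(abs(n))[2:], strip the trailing (unclosed) zeros, split on '1' into the closed zero-runs and return the longest run's length.
import Mathlib
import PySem

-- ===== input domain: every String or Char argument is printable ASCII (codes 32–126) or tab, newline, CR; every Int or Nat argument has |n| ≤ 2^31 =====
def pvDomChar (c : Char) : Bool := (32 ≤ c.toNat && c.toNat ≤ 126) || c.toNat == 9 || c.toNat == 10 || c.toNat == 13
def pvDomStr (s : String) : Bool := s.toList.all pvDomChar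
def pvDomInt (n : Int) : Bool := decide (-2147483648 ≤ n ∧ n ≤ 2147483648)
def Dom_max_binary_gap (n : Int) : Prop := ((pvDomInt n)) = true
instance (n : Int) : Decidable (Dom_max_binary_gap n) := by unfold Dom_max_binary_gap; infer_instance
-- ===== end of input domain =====

-- B replaces A's open/close state machine with rstrip-trailing-zeros + split-on-'1' + max run length (same cost, plainer decomposition).


-- shared helper: the binary digits Python's bin() prints for a positive integer (MSB first); exact for m > 0
def binDigits (m : Nat) : List Char :=
  if m = 0 then []
  else binDigits (m / 2) ++ [if m % 2 = 1 then '1' else '0']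
decreasing_by exact Nat.div_lt_self (Nat.pos_of_ne_zero (by assumption)) (by omega)

-- ===== PORT A =====
-- the for-loop of A, as structural recursion over the same (gap_value, max_gap, is_gap_open) state
def aLoop : List Char → Int → Int → Bool → Int
  | [], _, mx, _ => mx
  | bit :: t, gap, mx, isOpen =>
    if bit == '0' && isOpen then aLoop t (gap + 1) mx isOpen
    else aLoop t 0 (if decide (gap > mx) && isOpen then gap else mx) true

def max_binary_gap (n : Int) : Int :=
  -- bin(n)[2:] ported by hand (exact): "0b…"[2:] = digits; bin(0)[2:] = "0"; "-0b…"[2:] = 'b' :: digits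
  let binary_repr : List Char :=
    if n = 0 then ['0']
    else if 0 < n then binDigits n.toNat
    else 'b' :: binDigits (-n).toNat
  aLoop binary_repr 0 0 false

-- ===== PORT B =====
-- s.rstrip('0') ported by hand (exact): drop the trailing '0' characters
def rstrip0 (l : List Char) : List Char := (l.reverse.dropWhile (· == '0')).reverse

def max_binary_gap_alt (n : Int) : Int :=
  -- bin(abs(n))[2:] via the same bin() helper; .split('1') is List.splitOn (exact for a 1-char separator)
  let s : List Char := if n.natAbs = 0 then ['0'] else binDigits n.natAbs
  let runs : List (List Char) := (rstrip0 s).splitOn '1'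
  -- max(len(run) for run in runs): runs is never empty (split always yields ≥ 1 piece)
  match runs.map (fun r => (r.length : Int)) with
  | [] => 0
  | h :: t => t.foldl max h

-- ===== PRECONDITION & SPEC =====
def Spec_max_binary_gap (n : Int) (out : Int) : Prop := out = max_binary_gap_alt n
instance (n : Int) (out : Int) : Decidable (Spec_max_binary_gap n out) := by unfold Spec_max_binary_gap; infer_instance

-- ===== CLAIM (what is proved, stated in full; the proofs are below) =====
def Claim_equal_max_binary_gap : Prop := ∀ (n : Int), Dom_max_binary_gap n → Spec_max_binary_gap n (max_binary_gap n)

-- ===== LEMMAS AND PROOFS =====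

-- B's value on a character list (the match-on-runs expression of the port)
def gapVal (l : List Char) : Int :=
  match ((rstrip0 l).splitOn '1').map (fun r => (r.length : Int)) with
  | [] => 0
  | h :: t => t.foldl max h

lemma alt_eq_gapVal (n : Int) :
    max_binary_gap_alt n = gapVal (if n.natAbs = 0 then ['0'] else binDigits n.natAbs) := rfl

lemma binDigits_digits : ∀ m, ∀ c ∈ binDigits m, c = '0' ∨ c = '1' := by
  intro m
  induction m using Nat.strong_induction_on with
  | _ m ih =>
    intro c hc
    rw [binDigits] at hc
    split at hc
    · simp at hc
    · rcases List.mem_append.1 hc with h | h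
      · exact ih (m / 2) (Nat.div_lt_self (Nat.pos_of_ne_zero (by assumption)) (by omega)) c h
      · simp at h; subst h; split <;> simp

lemma binDigits_head : ∀ m, 0 < m → ∃ t, binDigits m = '1' :: t := by
  intro m
  induction m using Nat.strong_induction_on with
  | _ m ih =>
    intro hm
    rw [binDigits]
    rw [if_neg (by omega)]
    by_cases h2 : m / 2 = 0
    · have : m = 1 := by omega
      subst this
      exact ⟨[], by simp; rw [binDigits]; simp⟩
    · obtain ⟨t, ht⟩ := ih (m / 2) (Nat.div_lt_self hm (by omega)) (Nat.pos_of_ne_zero h2)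
      exact ⟨t ++ [if m % 2 = 1 then '1' else '0'], by rw [ht]; simp⟩

lemma dropWhile_append_cons (v w : List Char) (c : Char) (hc : (c == '0') = false) :
    List.dropWhile (· == '0') (v ++ c :: w) = List.dropWhile (· == '0') v ++ c :: w := by
  induction v with
  | nil => simp [List.dropWhile, hc]
  | cons a v ih =>
    by_cases ha : (a == '0') = true
    · simp [List.dropWhile, ha, ih]
    · simp only [Bool.not_eq_true] at ha
      simp [List.dropWhile, ha]

lemma rstrip0_append_one (u t : List Char) :
    rstrip0 (u ++ '1' :: t) = u ++ '1' :: rstrip0 t := by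
  unfold rstrip0
  rw [show (u ++ '1' :: t).reverse = t.reverse ++ '1' :: u.reverse by simp]
  rw [dropWhile_append_cons _ _ '1' (by decide)]
  simp

lemma rstrip0_replicate (g : Nat) : rstrip0 (List.replicate g '0') = [] := by
  unfold rstrip0
  rw [List.reverse_replicate]
  have : List.dropWhile (· == '0') (List.replicate g '0') = [] := by
    induction g with
    | zero => rfl
    | succ g ih => simp [List.replicate_succ, ih]
  simp [this]

lemma foldl_max_max (l : List Int) : ∀ a b, l.foldl max (max a b) = max a (l.foldl max b) := by
  induction l with
  | nil => intro a b; rfl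
  | cons x t ih =>
    intro a b
    simp only [List.foldl_cons]
    rw [max_assoc, ih]

-- B on g leading zeros, a '1', then t: the first closed run has length g, the rest is B on t
lemma gapVal_replicate_one (g : Nat) (t : List Char) :
    gapVal (List.replicate g '0' ++ '1' :: t) = max (g : Int) (gapVal t) := by
  unfold gapVal
  rw [rstrip0_append_one]
  simp only [List.splitOn]
  rw [List.splitOnP_first (· == '1') (List.replicate g '0')
      (fun x hx => by rw [List.eq_of_mem_replicate hx]; decide) '1' (by decide) (rstrip0 t)]
  have hne := List.splitOnP_ne_nil (· == '1') (rstrip0 t)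
  rcases h : (rstrip0 t).splitOnP (· == '1') with _ | ⟨r, rs⟩
  · exact absurd h hne
  · simp only [List.map_cons, List.length_replicate, List.foldl_cons]
    rw [foldl_max_max]

-- key invariant: A's loop from an open state equals B's value with the current gap prepended as zeros
lemma aLoop_open (t : List Char) (hd : ∀ c ∈ t, c = '0' ∨ c = '1') :
    ∀ g m : Nat, aLoop t (g : Int) (m : Int) true = max (m : Int) (gapVal (List.replicate g '0' ++ t)) := by
  induction t with
  | nil =>
    intro g m
    have h1 : gapVal (List.replicate g '0' ++ []) = 0 := by
      unfold gapVal
      rw [List.append_nil, rstrip0_replicate]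
      simp [List.splitOn, List.splitOnP_nil]
    rw [h1, max_eq_left (Int.natCast_nonneg m)]
    rfl
  | cons c t ih =>
    intro g m
    have hdt : ∀ x ∈ t, x = '0' ∨ x = '1' := fun x hx => hd x (List.mem_cons_of_mem c hx)
    rcases hd c (List.mem_cons_self) with h0 | h1
    · subst h0
      show aLoop ('0' :: t) (g : Int) (m : Int) true = _
      rw [aLoop, if_pos (by decide)]
      have : (g : Int) + 1 = ((g + 1 : Nat) : Int) := by push_cast; ring
      rw [this, ih hdt (g + 1) m]
      rw [List.replicate_succ' , List.append_assoc]
      rfl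
    · subst h1
      show aLoop ('1' :: t) (g : Int) (m : Int) true = _
      rw [aLoop, if_neg (by decide)]
      have hmax : (if decide ((g : Int) > (m : Int)) && true then (g : Int) else (m : Int))
          = ((Nat.max g m : Nat) : Int) := by
        split <;> rename_i h <;> simp at h <;> push_cast <;> omega
      rw [hmax]
      have := ih hdt 0 (Nat.max g m)
      simp only [List.replicate_zero, List.nil_append, Nat.cast_zero] at this
      rw [this, gapVal_replicate_one]
      push_cast
      rw [← max_assoc, max_comm (m : Int) (g : Int), max_assoc]

-- A's first iteration from the closed start state just opens the gap
lemma aLoop_start (c : Char) (t : List Char) :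
    aLoop (c :: t) 0 0 false = aLoop t 0 0 true := by
  rw [aLoop]
  simp

lemma main_pos (m : Nat) (hm : 0 < m) :
    aLoop (binDigits m) 0 0 false = gapVal (binDigits m) := by
  obtain ⟨t, ht⟩ := binDigits_head m hm
  have hdt : ∀ c ∈ t, c = '0' ∨ c = '1' := by
    intro c hc
    exact binDigits_digits m c (by rw [ht]; exact List.mem_cons_of_mem _ hc)
  rw [ht, aLoop_start]
  have h1 := aLoop_open t hdt 0 0
  simp only [List.replicate_zero, List.nil_append, Nat.cast_zero] at h1
  have h2 := gapVal_replicate_one 0 t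
  simp only [List.replicate_zero, List.nil_append, Nat.cast_zero] at h2
  rw [h1, h2]

-- ===== VERDICT (by name: the statement is the Claim_ definition above) =====
theorem max_binary_gap_spec : Claim_equal_max_binary_gap := by
  intro n _
  show aLoop (if n = 0 then ['0'] else if 0 < n then binDigits n.toNat
        else 'b' :: binDigits (-n).toNat) 0 0 false = max_binary_gap_alt n
  rw [alt_eq_gapVal]
  by_cases h0 : n = 0
  · subst h0; decide
  · rw [if_neg h0, if_neg (show ¬ n.natAbs = 0 by omega)]
    by_cases hp : 0 < n
    · rw [if_pos hp, show n.toNat = n.natAbs by omega]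
      exact main_pos n.natAbs (by omega)
    · rw [if_neg hp, show (-n).toNat = n.natAbs by omega]
      -- the leading 'b' of bin(n)[2:] for n < 0 only opens the gap, like the leading '1' does
      obtain ⟨t, ht⟩ := binDigits_head n.natAbs (by omega)
      rw [aLoop_start 'b', ht]
      have hopen : aLoop ('1' :: t) 0 0 true = aLoop t 0 0 true := by
        rw [aLoop]; simp
      rw [hopen, ← aLoop_start '1', ← ht]
      exact main_pos n.natAbs (by omega)
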